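-- pv_equiv track=rewrite | github.com/gero0/IMS_Projekt | src/jpeg.py | val_to_bitstream
-- ===== SOURCE A (Python) =====
-- def val_to_bitstream(n):
--     if n == 0:
--         return ""
--
--     binstr = bin(abs(n))[2:]
--
--     def invert(c):
--         if c == "0":
--             return "1"
--         return "0"
--
--     if n < 0:
--         new_binstr = [invert(c) for c in binstr]
--         binstr = "".join(new_binstr)
--
--     return binstr
-- ===== SOURCE B (Python) =====
-- def val_to_bitstream(n):
--     if n == 0:
--         return ""
--     a = abs(n)
--     binstr = bin(a)[2:]
--     if n > 0:
--         return binstr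
--     L = len(binstr)
--     val = (1 << L) - 1 - a
--     return format(val, '0' + str(L) + 'b')
-- ===== Notes on version B (the rewrite author's own statement) =====
-- stated objective: idiomatic
-- what changed: For negative inputs B replaces the per-character string inversion loop with a closed-form arithmetic one's-complement (subtract from the all-ones mask of the bit length) rendered via zero-padded binary format.
import Mathlib
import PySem

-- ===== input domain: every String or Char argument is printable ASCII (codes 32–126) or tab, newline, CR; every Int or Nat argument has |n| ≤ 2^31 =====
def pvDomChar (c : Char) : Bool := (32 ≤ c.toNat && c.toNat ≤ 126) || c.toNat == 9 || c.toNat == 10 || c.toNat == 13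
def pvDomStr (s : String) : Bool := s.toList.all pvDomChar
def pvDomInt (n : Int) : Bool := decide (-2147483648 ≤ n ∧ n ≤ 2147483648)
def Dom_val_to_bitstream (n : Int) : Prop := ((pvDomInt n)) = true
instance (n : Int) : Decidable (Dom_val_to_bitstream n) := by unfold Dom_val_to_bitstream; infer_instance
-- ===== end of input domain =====

-- B replaces A's per-character inversion loop for negatives with a closed-form
-- arithmetic one's-complement ((1<<L)-1-a) rendered zero-padded to width L (idiomatic).


-- ===== PORT A =====
-- bin(m)[2:] as a list of chars ('' for m = 0), shared by both ports (both Pythons call bin)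
def pvBits (m : Nat) : List Char :=
  if h : m = 0 then [] else pvBits (m / 2) ++ [if m % 2 = 1 then '1' else '0']
decreasing_by exact Nat.div_lt_self (Nat.pos_of_ne_zero h) one_lt_two

def pvInvert (c : Char) : Char := if c = '0' then '1' else '0'

def val_to_bitstream (n : Int) : String :=
  if n = 0 then ""
  else
    let binstr := pvBits n.natAbs
    if n < 0 then String.mk (binstr.map pvInvert) else String.mk binstr

-- ===== PORT B =====
-- format(val, '0<L>b'): binary digits of val left-padded with '0' to width L
def val_to_bitstream_alt (n : Int) : String :=
  if n = 0 then ""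
  else
    let a := n.natAbs
    let binstr := pvBits a
    if n > 0 then String.mk binstr
    else
      let L := binstr.length
      let val := 2 ^ L - 1 - a
      String.mk (List.replicate (L - (pvBits val).length) '0' ++ pvBits val)

-- ===== PRECONDITION & SPEC =====
def Spec_val_to_bitstream (n : Int) (out : String) : Prop := out = val_to_bitstream_alt n
instance (n : Int) (out : String) : Decidable (Spec_val_to_bitstream n out) := by unfold Spec_val_to_bitstream; infer_instance

-- ===== CLAIM (what is proved, stated in full; the proofs are below) =====
def Claim_equal_val_to_bitstream : Prop := ∀ (n : Int), Dom_val_to_bitstream n → Spec_val_to_bitstream n (val_to_bitstream n)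

-- ===== LEMMAS AND PROOFS =====

-- the binary digits of m, written to exactly L positions (MSB first)
def pvPad (L m : Nat) : List Char :=
  match L with
  | 0 => []
  | L + 1 => pvPad L (m / 2) ++ [if m % 2 = 1 then '1' else '0']

theorem pvBits_lt (m : Nat) : m < 2 ^ (pvBits m).length := by
  induction m using Nat.strong_induction_on with
  | _ m ih =>
    unfold pvBits
    split
    · simp [*]
    · rename_i h
      have ih2 := ih (m / 2) (Nat.div_lt_self (Nat.pos_of_ne_zero h) one_lt_two)
      simp only [List.length_append, List.length_cons, List.length_nil, pow_succ]
      omega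

theorem pvPad_eq (L : Nat) : ∀ m, m < 2 ^ L →
    pvPad L m = List.replicate (L - (pvBits m).length) '0' ++ pvBits m := by
  induction L with
  | zero =>
    intro m hm
    have : m = 0 := by simpa using hm
    subst this
    simp [pvPad, pvBits]
  | succ L ih =>
    intro m hm
    by_cases hm0 : m = 0
    · subst hm0
      simp [pvPad, pvBits, ih 0 (Nat.one_le_two_pow), ← List.replicate_succ']
    · have hdiv : m / 2 < 2 ^ L := by
        have := hm; rw [pow_succ] at this; omega
      have hb : pvBits m = pvBits (m / 2) ++ [if m % 2 = 1 then '1' else '0'] := by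
        rw [pvBits]; simp [hm0]
      rw [pvPad, ih (m / 2) hdiv, hb]
      simp only [List.length_append, List.length_cons, List.length_nil, List.append_assoc]
      congr 2
      omega

theorem pvPad_invert (L : Nat) : ∀ m, m < 2 ^ L →
    (pvPad L m).map pvInvert = pvPad L (2 ^ L - 1 - m) := by
  induction L with
  | zero => intro m hm; simp [pvPad]
  | succ L ih =>
    intro m hm
    rw [pow_succ] at hm
    have hq : m / 2 < 2 ^ L := by omega
    have hdiv : (2 ^ (L + 1) - 1 - m) / 2 = 2 ^ L - 1 - m / 2 := by
      rw [pow_succ]; omega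
    have hmod : (2 ^ (L + 1) - 1 - m) % 2 = 1 - m % 2 := by
      rw [pow_succ]; omega
    rw [pvPad, pvPad, List.map_append, ih (m / 2) hq, hdiv, hmod]
    congr 1
    rcases Nat.mod_two_eq_zero_or_one m with h | h <;> simp [h, pvInvert]

theorem val_to_bitstream_eq (n : Int) : val_to_bitstream n = val_to_bitstream_alt n := by
  unfold val_to_bitstream val_to_bitstream_alt
  by_cases h0 : n = 0
  · simp [h0]
  · simp only [h0, if_false]
    rcases lt_trichotomy n 0 with hneg | hz | hpos
    · have hnpos : ¬ n > 0 := by omega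
      simp only [hneg, if_true, hnpos, if_false]
      set a := n.natAbs with ha
      set L := (pvBits a).length with hL
      have haL : a < 2 ^ L := pvBits_lt a
      have h1 : pvPad L a = pvBits a := by
        rw [pvPad_eq L a haL, ← hL]; simp
      have h2 := pvPad_invert L a haL
      rw [h1] at h2
      rw [h2, pvPad_eq L (2 ^ L - 1 - a) (by omega)]
    · exact absurd hz h0
    · have hnneg : ¬ n < 0 := by omega
      simp [hpos, hnneg]

-- ===== VERDICT (by name: the statement is the Claim_ definition above) =====
theorem val_to_bitstream_spec : Claim_equal_val_to_bitstream := by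
  intro n _
  unfold Spec_val_to_bitstream
  exact val_to_bitstream_eq n
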